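-- pv_equiv track=rewrite | github.com/17818403529/chess_engine | cal_feasible_moves.py | biship
-- ===== SOURCE A (Python) =====
-- def cal_pos(pos, vec, steps):
--     col = "abcdefgh".index(pos[0]) + steps * vec[0]
--     row = "12345678".index(pos[1]) + steps * vec[1]
--     if col in range(0, 8) and row in range(0, 8):
--         return "abcdefgh"[col] + "12345678"[row]
--     else:
--         return None
--
-- def biship(pos):
--     fea = []
--     for vec in [(1, 1), (-1, -1), (-1, 1), (1, -1)]:
--         _fea = []
--         for steps in range(1, 8):
--             des = cal_pos(pos, vec, steps)
--             if des:
--                 _fea.append(des)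
--             else:
--                 break
--         if _fea != []:
--             fea.append(_fea)
--     return fea
-- ===== SOURCE B (Python) =====
-- def biship(pos):
--     col = "abcdefgh".index(pos[0])
--     row = "12345678".index(pos[1])
--     fea = []
--     for dc, dr in [(1, 1), (-1, -1), (-1, 1), (1, -1)]:
--         n = min(7 - col if dc > 0 else col, 7 - row if dr > 0 else row)
--         if n > 0:
--             fea.append(["abcdefgh"[col + s * dc] + "12345678"[row + s * dr]
--                         for s in range(1, n + 1)])
--     return fea
-- ===== Notes on version B (the rewrite author's own statement) =====
-- stated objective: simpler
-- what changed: B converts pos to col/row indices once and computes each diagonal ray's length arithmetically as min of the distances to the two edges, building the ray with a single comprehension, instead of A's per-step re-lookup, bounds check and break.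
import Mathlib
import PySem

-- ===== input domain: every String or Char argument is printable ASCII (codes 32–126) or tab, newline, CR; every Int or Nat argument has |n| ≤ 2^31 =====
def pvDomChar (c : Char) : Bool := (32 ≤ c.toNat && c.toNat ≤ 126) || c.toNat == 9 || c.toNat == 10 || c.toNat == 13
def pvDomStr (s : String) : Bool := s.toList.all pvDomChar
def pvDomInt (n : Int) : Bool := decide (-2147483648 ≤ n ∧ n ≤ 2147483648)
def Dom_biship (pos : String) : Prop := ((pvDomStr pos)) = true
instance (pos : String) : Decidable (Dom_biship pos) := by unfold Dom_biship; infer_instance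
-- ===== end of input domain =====

-- B computes each diagonal ray's length arithmetically (min of the room to each edge) and builds it
-- with one map, instead of A's step-by-step probe with bounds check and break; objective: simpler.


-- ===== PORT A =====
-- cal_pos: 'none' = the Python call raises (IndexError/ValueError); 'some none' = it returns None.
def calPos (pos : String) (vec : Int × Int) (steps : Int) : Option (Option String) :=
  match PySem.Str.pyGet? pos 0 with
  | none => none
  | some c0 =>
    match PySem.List.index? "abcdefgh".toList c0 with
    | none => none
    | some ci =>
      match PySem.Str.pyGet? pos 1 with
      | none => none
      | some c1 =>
        match PySem.List.index? "12345678".toList c1 with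
        | none => none
        | some ri =>
          let col : Int := (ci : Int) + steps * vec.1
          let row : Int := (ri : Int) + steps * vec.2
          if 0 ≤ col ∧ col < 8 ∧ 0 ≤ row ∧ row < 8 then
            some (some (String.ofList [PySem.List.pyGetD "abcdefgh".toList col 'a',
                                   PySem.List.pyGetD "12345678".toList row '1']))
          else
            some none

-- the inner 'for steps in …: … else break' loop; a raising cal_pos (impossible under Pre_) stops too
def bishipInner (pos : String) (vec : Int × Int) : List Int → List String → List String
  | [], acc => acc
  | s :: rest, acc =>
    match calPos pos vec s with
    | some (some des) => bishipInner pos vec rest (acc ++ [des])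
    | _ => acc

def biship (pos : String) : List (List String) :=
  [((1:Int), (1:Int)), (-1, -1), (-1, 1), (1, -1)].foldl
    (fun fea vec =>
      let f := bishipInner pos vec (PySem.List.pyRange 1 8 1) []
      if f ≠ [] then fea ++ [f] else fea) []

-- ===== PORT B =====
-- core of Source B once col/row are known
def bishipAltCore (col row : Int) : List (List String) :=
  [((1:Int), (1:Int)), (-1, -1), (-1, 1), (1, -1)].foldl
    (fun fea v =>
      let n : Int := min (if v.1 > 0 then 7 - col else col) (if v.2 > 0 then 7 - row else row)
      if n > 0 then
        fea ++ [(PySem.List.pyRange 1 (n + 1) 1).map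
          (fun s => String.ofList [PySem.List.pyGetD "abcdefgh".toList (col + s * v.1) 'a',
                               PySem.List.pyGetD "12345678".toList (row + s * v.2) '1'])]
      else fea) []

def biship_alt (pos : String) : List (List String) :=
  match PySem.Str.pyGet? pos 0 with
  | none => []       -- pos[0] raises IndexError: excluded by Pre_
  | some c0 =>
    match PySem.List.index? "abcdefgh".toList c0 with
    | none => []     -- ValueError: excluded by Pre_
    | some col =>
      match PySem.Str.pyGet? pos 1 with
      | none => []
      | some c1 =>
        match PySem.List.index? "12345678".toList c1 with
        | none => []
        | some row => bishipAltCore (col : Int) (row : Int)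

-- ===== PRECONDITION & SPEC =====
-- Pre_: A raises (IndexError/ValueError) unless pos has ≥ 2 chars with pos[0] ∈ 'a'..'h', pos[1] ∈ '1'..'8'.
def Pre_biship (pos : String) : Prop :=
  2 ≤ pos.toList.length ∧ pos.toList.getD 0 ' ' ∈ "abcdefgh".toList
    ∧ pos.toList.getD 1 ' ' ∈ "12345678".toList
instance (pos : String) : Decidable (Pre_biship pos) := by unfold Pre_biship; infer_instance
def pvWitness_biship : String := "c4"
def Spec_biship (pos : String) (out : List (List String)) : Prop := out = biship_alt pos
instance (pos : String) (out : List (List String)) : Decidable (Spec_biship pos out) := by unfold Spec_biship; infer_instance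

-- ===== CLAIM (what is proved, stated in full; the proofs are below) =====
def Claim_equal_biship : Prop := ∀ (pos : String), Dom_biship pos → Pre_biship pos → Spec_biship pos (biship pos)

-- ===== LEMMAS AND PROOFS =====

-- A's whole computation once the first two characters are fixed
def bishipCoreA (c0 c1 : Char) (rest : List Char) : List (List String) :=
  biship (String.ofList (c0 :: c1 :: rest))

lemma pyGet01 (c0 c1 : Char) (rest : List Char) :
    PySem.Str.pyGet? (String.ofList (c0 :: c1 :: rest)) 0 = some c0 ∧
    PySem.Str.pyGet? (String.ofList (c0 :: c1 :: rest)) 1 = some c1 := by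
  constructor <;>
    simp [pysem, PySem.Chars.pyGet?, PySem.List.pyGet?, PySem.List.pyIdx?,
          String.toList_ofList] <;>
    rw [if_pos (by omega)] <;> simp

lemma calPos_core (c0 c1 : Char) (rest : List Char) (vec : Int × Int) (steps : Int) :
    calPos (String.ofList (c0 :: c1 :: rest)) vec steps = calPos (String.ofList [c0, c1]) vec steps := by
  unfold calPos
  rw [(pyGet01 c0 c1 rest).1, (pyGet01 c0 c1 rest).2,
      (pyGet01 c0 c1 []).1, (pyGet01 c0 c1 []).2]

lemma bishipInner_core (c0 c1 : Char) (rest : List Char) (vec : Int × Int)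
    (l : List Int) (acc : List String) :
    bishipInner (String.ofList (c0 :: c1 :: rest)) vec l acc
      = bishipInner (String.ofList [c0, c1]) vec l acc := by
  induction l generalizing acc with
  | nil => rfl
  | cons s t ih =>
    simp only [bishipInner, calPos_core c0 c1 rest vec s]
    cases calPos (String.ofList [c0, c1]) vec s with
    | none => rfl
    | some o => cases o with
      | none => rfl
      | some des => exact ih _

lemma biship_core (c0 c1 : Char) (rest : List Char) :
    biship (String.ofList (c0 :: c1 :: rest)) = biship (String.ofList [c0, c1]) := by
  unfold biship
  simp only [List.foldl, bishipInner_core c0 c1 rest]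

lemma biship_alt_core (c0 c1 : Char) (rest : List Char) :
    biship_alt (String.ofList (c0 :: c1 :: rest)) = biship_alt (String.ofList [c0, c1]) := by
  unfold biship_alt
  rw [(pyGet01 c0 c1 rest).1, (pyGet01 c0 c1 rest).2,
      (pyGet01 c0 c1 []).1, (pyGet01 c0 c1 []).2]

lemma core_eq : ("abcdefgh".toList.all fun c0 => "12345678".toList.all fun c1 =>
    biship (String.ofList [c0, c1]) == biship_alt (String.ofList [c0, c1])) = true := by
  decide

-- ===== VERDICT (by name: the statement is the Claim_ definition above) =====
theorem biship_spec : Claim_equal_biship := by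
  intro pos _ hpre
  obtain ⟨hlen, h0, h1⟩ := hpre
  match hp : pos.toList with
  | [] => simp [hp] at hlen
  | [c] => simp [hp] at hlen
  | c0 :: c1 :: rest =>
    rw [hp] at h0 h1
    simp only [List.getD_cons_zero, List.getD_cons_succ] at h0 h1
    have hs : pos = String.ofList (c0 :: c1 :: rest) := by
      rw [← hp, String.ofList_toList]
    unfold Spec_biship
    have hb := List.all_eq_true.mp (List.all_eq_true.mp core_eq c0 h0) c1 h1
    rw [hs, biship_core, biship_alt_core, eq_of_beq hb]
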